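-- pv_equiv track=rewrite | github.com/sanketbhamare656/krishipredict_freelance | app.py | get_crop_season
-- ===== SOURCE A (Python) =====
-- def get_crop_season(crop_name):
--     """Get the suitable season for a crop"""
--     season_mapping = {
--         'Kharif': ['Rice', 'Cotton', 'Soybean', 'Maize', 'Groundnut'],
--         'Rabi': ['Wheat', 'Onion', 'Potato', 'Sunflower', 'Chickpea'],
--         'Year-round': ['Sugarcane', 'Tomato', 'Brinjal', 'Cabbage', 'Cauliflower']
--     }
--
--     for season, crops in season_mapping.items():
--         if crop_name in crops:
--             return season
--
--     # Default based on crop type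
--     if crop_name in ['Rice', 'Cotton', 'Maize']:
--         return 'Kharif'
--     elif crop_name in ['Wheat', 'Onion']:
--         return 'Rabi'
--     else:
--         return 'Year-round'
-- ===== SOURCE B (Python) =====
-- def get_crop_season(crop_name):
--     """Get the suitable season for a crop"""
--     season_mapping = {
--         'Kharif': ['Rice', 'Cotton', 'Soybean', 'Maize', 'Groundnut'],
--         'Rabi': ['Wheat', 'Onion', 'Potato', 'Sunflower', 'Chickpea'],
--         'Year-round': ['Sugarcane', 'Tomato', 'Brinjal', 'Cabbage', 'Cauliflower']
--     }
--     reverse_map = {crop: season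
--                    for season, crops in season_mapping.items()
--                    for crop in crops}
--     return reverse_map.get(crop_name, 'Year-round')
-- ===== Notes on version B (the rewrite author's own statement) =====
-- stated objective: idiomatic
-- what changed: Replaces the scan over season lists (plus dead fallback branches that always yield 'Year-round') with a reverse crop->season dict built once by a comprehension and a single .get with default 'Year-round'.
import Mathlib
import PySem

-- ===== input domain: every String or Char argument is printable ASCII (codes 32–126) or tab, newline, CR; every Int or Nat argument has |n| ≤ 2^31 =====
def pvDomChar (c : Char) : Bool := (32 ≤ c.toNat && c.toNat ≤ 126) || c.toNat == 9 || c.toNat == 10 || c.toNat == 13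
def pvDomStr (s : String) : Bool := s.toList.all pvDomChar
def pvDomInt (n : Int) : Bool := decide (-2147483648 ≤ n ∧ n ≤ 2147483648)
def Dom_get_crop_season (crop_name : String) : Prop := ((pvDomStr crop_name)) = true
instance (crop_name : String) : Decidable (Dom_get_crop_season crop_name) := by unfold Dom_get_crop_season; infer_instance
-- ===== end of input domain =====

-- B replaces A's list scans and dead fallback branches with a reverse crop→season dict and one lookup with default 'Year-round' (idiomatic).

-- ===== PORT A =====
-- season_mapping.items(), in insertion order
def seasonItemsA : List (String × List String) :=
  [("Kharif", ["Rice", "Cotton", "Soybean", "Maize", "Groundnut"]),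
   ("Rabi", ["Wheat", "Onion", "Potato", "Sunflower", "Chickpea"]),
   ("Year-round", ["Sugarcane", "Tomato", "Brinjal", "Cabbage", "Cauliflower"])]

-- the 'for season, crops in …: if crop_name in crops: return season' loop
def seasonLoopA : List (String × List String) → String → Option String
  | [], _ => none
  | (season, crops) :: rest, c => if crops.contains c then some season else seasonLoopA rest c

def get_crop_season (crop_name : String) : String :=
  match seasonLoopA seasonItemsA crop_name with
  | some season => season
  | none =>
    if ["Rice", "Cotton", "Maize"].contains crop_name then "Kharif"
    else if ["Wheat", "Onion"].contains crop_name then "Rabi"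
    else "Year-round"

-- ===== PORT B =====
-- reverse_map = {crop: season for season, crops in season_mapping.items() for crop in crops}
def reverseMapB : PySem.Dict String String :=
  seasonItemsA.foldl
    (fun d sc => sc.2.foldl (fun d' crop => d'.insert crop sc.1) d) PySem.Dict.empty

def get_crop_season_alt (crop_name : String) : String :=
  PySem.Dict.getD reverseMapB crop_name "Year-round"

-- ===== PRECONDITION & SPEC =====
def Spec_get_crop_season (crop_name : String) (out : String) : Prop := out = get_crop_season_alt crop_name
instance (crop_name : String) (out : String) : Decidable (Spec_get_crop_season crop_name out) := by unfold Spec_get_crop_season; infer_instance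

-- ===== CLAIM (what is proved, stated in full; the proofs are below) =====
def Claim_equal_get_crop_season : Prop := ∀ (crop_name : String), Dom_get_crop_season crop_name → Spec_get_crop_season crop_name (get_crop_season crop_name)

-- ===== LEMMAS AND PROOFS =====

-- ===== VERDICT (by name: the statement is the Claim_ definition above) =====
theorem get_crop_season_spec : Claim_equal_get_crop_season := by
  intro c _
  unfold Spec_get_crop_season get_crop_season get_crop_season_alt
  have hB : reverseMapB = PySem.Dict.mk
      [("Rice", "Kharif"), ("Cotton", "Kharif"), ("Soybean", "Kharif"),
       ("Maize", "Kharif"), ("Groundnut", "Kharif"),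
       ("Wheat", "Rabi"), ("Onion", "Rabi"), ("Potato", "Rabi"),
       ("Sunflower", "Rabi"), ("Chickpea", "Rabi"),
       ("Sugarcane", "Year-round"), ("Tomato", "Year-round"), ("Brinjal", "Year-round"),
       ("Cabbage", "Year-round"), ("Cauliflower", "Year-round")] := by decide
  rw [hB]
  by_cases h : c ∈ ["Rice", "Cotton", "Soybean", "Maize", "Groundnut",
       "Wheat", "Onion", "Potato", "Sunflower", "Chickpea",
       "Sugarcane", "Tomato", "Brinjal", "Cabbage", "Cauliflower"]
  · simp only [List.mem_cons, List.not_mem_nil, or_false] at h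
    rcases h with rfl|rfl|rfl|rfl|rfl|rfl|rfl|rfl|rfl|rfl|rfl|rfl|rfl|rfl|rfl <;> decide
  · simp only [List.mem_cons, List.not_mem_nil, or_false, not_or] at h
    obtain ⟨n1,n2,n3,n4,n5,n6,n7,n8,n9,n10,n11,n12,n13,n14,n15⟩ := h
    simp [seasonItemsA, seasonLoopA, PySem.Dict.getD, PySem.Dict.get?, beq_iff_eq,
      n1, n2, n3, n4, n5, n6, n7, n8, n9, n10, n11, n12, n13, n14, n15,
      Ne.symm n1, Ne.symm n2, Ne.symm n3, Ne.symm n4, Ne.symm n5,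
      Ne.symm n6, Ne.symm n7, Ne.symm n8, Ne.symm n9, Ne.symm n10,
      Ne.symm n11, Ne.symm n12, Ne.symm n13, Ne.symm n14, Ne.symm n15]
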